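-- pv_equiv track=rewrite | github.com/richardvozar/teaching_2022_01 | 11/megoldas_11.py | kasszahoz_rendel_02
-- ===== SOURCE A (Python) =====
-- def kasszahoz_rendel_02(s):
-- 	s = s.split(';')
--
-- 	parosak = []
-- 	paratlanok = []
--
-- 	for n in s:
-- 		n = int(n)
-- 		if n % 2 == 0:
-- 			parosak.append(n)
-- 		else:
-- 			paratlanok.append(n)
--
-- 	parosak.sort()
-- 	paratlanok.sort()
--
-- 	ret = [parosak, paratlanok]
--
-- 	return ret
-- ===== SOURCE B (Python) =====
-- def kasszahoz_rendel_02(s):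
--     evens, odds = [], []
--     for t in s.split(';'):
--         n = int(t)
--         tgt = evens if n % 2 == 0 else odds
--         i = 0
--         while i < len(tgt) and tgt[i] <= n:
--             i += 1
--         tgt.insert(i, n)
--     return [evens, odds]
-- ===== Notes on version B (the rewrite author's own statement) =====
-- stated objective: alternative
-- what changed: B never calls sort: it keeps each parity list sorted at all times, inserting every parsed number at its ordered position during the single pass (online insertion sort), whereas A appends unordered and runs two library sorts afterwards.
import Mathlib
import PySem

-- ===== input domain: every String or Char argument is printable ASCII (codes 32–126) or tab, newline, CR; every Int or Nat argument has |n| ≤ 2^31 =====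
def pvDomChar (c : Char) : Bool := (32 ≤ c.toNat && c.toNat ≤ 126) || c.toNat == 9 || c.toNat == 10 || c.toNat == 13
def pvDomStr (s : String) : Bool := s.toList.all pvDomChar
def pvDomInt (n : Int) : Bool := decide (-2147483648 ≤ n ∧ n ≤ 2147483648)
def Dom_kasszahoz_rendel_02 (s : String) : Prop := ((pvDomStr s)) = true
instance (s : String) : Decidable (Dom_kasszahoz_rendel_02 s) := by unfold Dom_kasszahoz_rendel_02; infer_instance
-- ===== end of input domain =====

-- B replaces A's append-then-two-library-sorts with an online insertion sort:
-- each parity list is kept sorted at all times by ordered insertion (objective: alternative).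

-- ===== PORT A =====
-- A: split on ';', loop partitioning parsed ints into evens/odds, then sort each list.
-- int(n) is PySem.Int.ofStr?; Pre_ guarantees every token parses, so getD 0 is never taken.
def kasszahoz_rendel_02 (s : String) : List (List Int) :=
  let toks := (PySem.Str.split? s ";").getD []
  let st := toks.foldl (fun (st : List Int × List Int) t =>
    let n := (PySem.Int.ofStr? t).getD 0
    if PySem.Int.mod n 2 = 0 then (st.1 ++ [n], st.2) else (st.1, st.2 ++ [n]))
    ([], [])
  [PySem.List.sorted st.1 (fun x => x) false, PySem.List.sorted st.2 (fun x => x) false]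

-- ===== PORT B =====
-- B's hand-written while loop: skip elements ≤ n, insert n there (rightmost tie position).
def pvInsertOrd (n : Int) : List Int → List Int
  | [] => [n]
  | x :: xs => if x ≤ n then x :: pvInsertOrd n xs else n :: x :: xs

-- B: single pass; each parsed number is inserted at its ordered position in its parity list.
def kasszahoz_rendel_02_alt (s : String) : List (List Int) :=
  let toks := (PySem.Str.split? s ";").getD []
  let st := toks.foldl (fun (st : List Int × List Int) t =>
    let n := (PySem.Int.ofStr? t).getD 0
    if PySem.Int.mod n 2 = 0 then (pvInsertOrd n st.1, st.2) else (st.1, pvInsertOrd n st.2))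
    ([], [])
  [st.1, st.2]

-- ===== PRECONDITION & SPEC =====
-- Pre_ excludes exactly the inputs where int(token) raises ValueError (both A and B raise there).
def Pre_kasszahoz_rendel_02 (s : String) : Prop :=
  (((PySem.Str.split? s ";").getD []).all (fun t => (PySem.Int.ofStr? t).isSome)) = true
instance (s : String) : Decidable (Pre_kasszahoz_rendel_02 s) := by unfold Pre_kasszahoz_rendel_02; infer_instance
def pvWitness_kasszahoz_rendel_02 : String := "2;3;10"

def Spec_kasszahoz_rendel_02 (s : String) (out : List (List Int)) : Prop := out = kasszahoz_rendel_02_alt s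
instance (s : String) (out : List (List Int)) : Decidable (Spec_kasszahoz_rendel_02 s out) := by unfold Spec_kasszahoz_rendel_02; infer_instance

-- ===== CLAIM (what is proved, stated in full; the proofs are below) =====
def Claim_equal_kasszahoz_rendel_02 : Prop := ∀ (s : String), Dom_kasszahoz_rendel_02 s → Pre_kasszahoz_rendel_02 s → Spec_kasszahoz_rendel_02 s (kasszahoz_rendel_02 s)

-- ===== LEMMAS AND PROOFS =====

-- B's hand-written ordered insert is PySem's insertBy with the strict-< "before" test.
theorem pvInsertOrd_eq_insertBy (n : Int) (l : List Int) :
    pvInsertOrd n l = PySem.List.insertBy (fun a b => decide (a < b)) n l := by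
  induction l with
  | nil => rfl
  | cons x xs ih =>
    simp only [pvInsertOrd, PySem.List.insertBy]
    by_cases h : x ≤ n
    · rw [if_pos h, if_neg (by simpa using h), ih]
    · rw [if_neg h, if_pos (by simpa using lt_of_not_ge h)]

-- A's partition loop, over any token list, yields the two filters of the parsed list.
theorem pvPartitionFold (f : String → Int) (p : Int → Prop) [DecidablePred p]
    (toks : List String) (a b : List Int) :
    toks.foldl (fun (st : List Int × List Int) t =>
      if p (f t) then (st.1 ++ [f t], st.2) else (st.1, st.2 ++ [f t])) (a, b)
    = (a ++ (toks.map f).filter (fun n => decide (p n)),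
       b ++ (toks.map f).filter (fun n => decide ¬ p n)) := by
  induction toks generalizing a b with
  | nil => simp
  | cons t ts ih =>
    simp only [List.foldl_cons, List.map_cons, List.filter_cons]
    by_cases h : p (f t)
    · rw [if_pos h, ih]; simp [h]
    · rw [if_neg h, ih]; simp [h]

-- B's loop splits into two independent insertion folds over the parity filters.
theorem pvInsertFold (f : String → Int) (p : Int → Prop) [DecidablePred p]
    (toks : List String) (a b : List Int) :
    toks.foldl (fun (st : List Int × List Int) t =>
      if p (f t) then (pvInsertOrd (f t) st.1, st.2) else (st.1, pvInsertOrd (f t) st.2)) (a, b)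
    = (((toks.map f).filter (fun n => decide (p n))).foldl (fun acc n => pvInsertOrd n acc) a,
       ((toks.map f).filter (fun n => decide ¬ p n)).foldl (fun acc n => pvInsertOrd n acc) b) := by
  induction toks generalizing a b with
  | nil => simp
  | cons t ts ih =>
    simp only [List.foldl_cons, List.map_cons, List.filter_cons]
    by_cases h : p (f t)
    · rw [if_pos h, ih]; simp [h]
    · rw [if_neg h, ih]; simp [h]

-- folding B's ordered insert from [] is exactly Python's sorted (PySem's insertion sort).
theorem pvInsertFold_sorted (l : List Int) :
    l.foldl (fun acc n => pvInsertOrd n acc) [] = PySem.List.sorted l (fun x => x) false := by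
  rw [PySem.List.sorted_eq_foldl_insertBy]
  induction l using List.reverseRecOn with
  | nil => rfl
  | append_singleton xs x ih => rw [List.foldl_append, List.foldl_append, ih]; simp [pvInsertOrd_eq_insertBy]

-- ===== VERDICT (by name: the statement is the Claim_ definition above) =====
theorem kasszahoz_rendel_02_spec : Claim_equal_kasszahoz_rendel_02 := by
  intro s _ _
  show _ = _
  unfold kasszahoz_rendel_02 kasszahoz_rendel_02_alt
  dsimp only
  rw [pvPartitionFold (fun t => (PySem.Int.ofStr? t).getD 0) (fun n => PySem.Int.mod n 2 = 0),
      pvInsertFold (fun t => (PySem.Int.ofStr? t).getD 0) (fun n => PySem.Int.mod n 2 = 0)]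
  simp only [List.nil_append, pvInsertFold_sorted]
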